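-- pv_equiv track=rewrite | github.com/OctaviaOZ/Python_trainee | tasks01.py | Cipher_Zeroes
-- ===== SOURCE A (Python) =====
-- def Cipher_Zeroes(N):
--
--     # Constraints
--     #if (int(N) < 1) or (int(N) > 1e1000):
--     #   return 0
--
--     visible_zeros_1 = '069'
--     visible_zeros_2 = '8'
--
--     number_points = 0
--     for number in N:
--         if number in visible_zeros_1:
--             number_points += 1
--         elif number in visible_zeros_2:
--             number_points += 2
--
--     if number_points:
--         if number_points % 2:
--             number_points -= 1
--         else:
--             number_points += 1
--
--     return int(bin(number_points)[2:])
-- ===== SOURCE B (Python) =====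
-- def Cipher_Zeroes(N):
--     # Divide-and-conquer: recursively split the string in half and add the
--     # hole-point counts of the halves; parity adjustment is a single XOR.
--     def pts(i, j):
--         if j - i == 0:
--             return 0
--         if j - i == 1:
--             c = N[i]
--             return 2 if c == '8' else (1 if c in '069' else 0)
--         m = (i + j) // 2
--         return pts(i, m) + pts(m, j)
--
--     p = pts(0, len(N))
--     if p:
--         p ^= 1
--     return int(bin(p)[2:])
-- ===== Notes on version B (the rewrite author's own statement) =====
-- stated objective: alternative
-- what changed: A's single linear accumulation loop with a branchy parity fix is replaced by a divide-and-conquer recursion that splits the string in half and adds the halves' point counts, and the two-branch parity adjustment becomes a single XOR with 1; the binary-digits tail is kept.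
import Mathlib
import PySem

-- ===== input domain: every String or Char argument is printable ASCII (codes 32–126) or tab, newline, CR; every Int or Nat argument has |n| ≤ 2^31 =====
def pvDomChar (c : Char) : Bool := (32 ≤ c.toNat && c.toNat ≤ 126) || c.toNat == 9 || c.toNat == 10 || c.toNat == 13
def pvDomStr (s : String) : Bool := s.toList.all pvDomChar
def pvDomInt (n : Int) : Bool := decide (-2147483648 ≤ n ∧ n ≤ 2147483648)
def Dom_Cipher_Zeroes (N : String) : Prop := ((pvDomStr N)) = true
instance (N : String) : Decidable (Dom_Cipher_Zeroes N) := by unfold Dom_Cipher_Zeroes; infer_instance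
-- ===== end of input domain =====

-- B replaces A's linear accumulation loop by a divide-and-conquer split-in-half recursion and the two-branch parity fix by a single XOR; same values everywhere.

-- ===== PORT A =====
-- shared helper: int(bin(n)[2:]) for n >= 0, i.e. the binary digit string of n read as a decimal number
def pvBinAsDec : Nat → Nat
  | 0 => 0
  | n+1 => pvBinAsDec ((n+1)/2) * 10 + (n+1) % 2

def Cipher_Zeroes (N : String) : Int :=
  let visible_zeros_1 := "069"
  let visible_zeros_2 := "8"
  let number_points : Int :=
    N.toList.foldl (fun acc number =>
      if PySem.Chars.isIn [number] visible_zeros_1.toList then acc + 1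
      else if PySem.Chars.isIn [number] visible_zeros_2.toList then acc + 2
      else acc) 0
  let number_points :=
    if number_points ≠ 0 then
      if PySem.Int.mod number_points 2 ≠ 0 then number_points - 1 else number_points + 1
    else number_points
  -- int(bin(number_points)[2:]): number_points is provably ≥ 0 here, so .toNat is exact
  (pvBinAsDec number_points.toNat : Int)

-- ===== PORT B =====
-- pts(i, j) of Source B, on the sublist N[i:j]: split in half, recurse on the halves
def pvPts : List Char → Nat
  | [] => 0
  | [c] => if c == '8' then 2 else if PySem.Chars.isIn [c] "069".toList then 1 else 0
  | c1 :: c2 :: rest =>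
      let cs := c1 :: c2 :: rest
      pvPts (cs.take (cs.length / 2)) + pvPts (cs.drop (cs.length / 2))
termination_by cs => cs.length
decreasing_by
  · simp; omega
  · simp; omega

def Cipher_Zeroes_alt (N : String) : Int :=
  let p := pvPts N.toList
  let p := if p ≠ 0 then p ^^^ 1 else p
  (pvBinAsDec p : Int)

-- ===== PRECONDITION & SPEC =====
def Spec_Cipher_Zeroes (N : String) (out : Int) : Prop := out = Cipher_Zeroes_alt N
instance (N : String) (out : Int) : Decidable (Spec_Cipher_Zeroes N out) := by unfold Spec_Cipher_Zeroes; infer_instance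

-- ===== CLAIM (what is proved, stated in full; the proofs are below) =====
def Claim_equal_Cipher_Zeroes : Prop := ∀ (N : String), Dom_Cipher_Zeroes N → Spec_Cipher_Zeroes N (Cipher_Zeroes N)

-- ===== LEMMAS AND PROOFS =====
-- 'c in s' for a single character is list membership
theorem isIn_single (c : Char) (l : List Char) : PySem.Chars.isIn [c] l = l.contains c := by
  rcases h : l.contains c with _ | _
  · rw [PySem.Chars.isIn_eq_false_iff]
    intro hinf
    have := List.singleton_sublist.mp hinf.sublist
    simp_all
  · rw [PySem.Chars.isIn_iff_infix]
    have hc : c ∈ l := by simpa using h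
    obtain ⟨s, t, rfl⟩ := List.append_of_mem hc
    exact ⟨s, t, by simp⟩

-- the point weight of a single character
def pvWeight (c : Char) : Nat :=
  if c = '0' ∨ c = '6' ∨ c = '9' then 1 else if c = '8' then 2 else 0

theorem pvPts_single (c : Char) : pvPts [c] = pvWeight c := by
  simp only [pvPts, pvWeight, isIn_single]
  by_cases h8 : c = '8'
  · subst h8; decide
  · by_cases h0 : c = '0' <;> by_cases h6 : c = '6' <;> by_cases h9 : c = '9' <;>
      simp_all [List.contains_eq_mem]

-- divide and conquer sums the per-character weights
theorem pvPts_eq_sum (cs : List Char) : pvPts cs = (cs.map pvWeight).sum := by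
  induction cs using pvPts.induct with
  | case1 => simp [pvPts]
  | case2 c _ => simp [pvPts_single]
  | case3 c _ _ => simp [pvPts_single]
  | case4 c _ _ => simp [pvPts_single]
  | case5 c1 c2 rest cs0 ih1 ih2 =>
    rw [pvPts]
    simp only at ih1 ih2
    rw [ih1, ih2, ← List.sum_append, ← List.map_append, List.take_append_drop]

-- A's accumulation loop also sums the per-character weights
theorem foldA (cs : List Char) (acc : Int) :
    cs.foldl (fun acc number =>
      if PySem.Chars.isIn [number] "069".toList then acc + 1
      else if PySem.Chars.isIn [number] "8".toList then acc + 2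
      else acc) acc
    = acc + ((cs.map pvWeight).sum : Nat) := by
  induction cs generalizing acc with
  | nil => simp
  | cons x t ih =>
    rw [List.foldl_cons, ih]
    simp only [isIn_single, List.map_cons, List.sum_cons, pvWeight]
    by_cases h0 : x = '0'
    · subst h0; simp; ring
    · by_cases h6 : x = '6'
      · subst h6; simp; ring
      · by_cases h9 : x = '9'
        · subst h9; simp; ring
        · by_cases h8 : x = '8'
          · subst h8; simp [h0, h6, h9]; ring
          · simp [h0, h6, h9, h8, List.contains_eq_mem]

-- the parity adjustment is XOR with 1 (for n ≠ 0)
theorem parity_xor (n : Nat) : (if n % 2 = 1 then n - 1 else n + 1) = n ^^^ 1 := by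
  rcases Nat.even_or_odd n with h | h
  · rw [Nat.xor_one_of_even h, if_neg (by simp [Nat.even_iff.mp h])]
  · rw [Nat.xor_one_of_odd h, if_pos (Nat.odd_iff.mp h)]

theorem main_eq (N : String) : Cipher_Zeroes N = Cipher_Zeroes_alt N := by
  simp only [Cipher_Zeroes, Cipher_Zeroes_alt, foldA, pvPts_eq_sum, zero_add]
  set n : Nat := (N.toList.map pvWeight).sum with hn
  refine congrArg (fun m : Nat => (pvBinAsDec m : Int)) ?_
  by_cases h : n = 0
  · simp [h]
  · have hmod : PySem.Int.mod (n : Int) 2 = ((n % 2 : Nat) : Int) := by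
      exact_mod_cast PySem.Int.mod_natCast n 2
    rw [if_pos (show (n : Int) ≠ 0 by exact_mod_cast h), if_pos h, hmod, ← parity_xor n]
    by_cases hp : n % 2 = 1
    · rw [if_pos (show ((n % 2 : Nat) : Int) ≠ 0 by simp [hp]), if_pos hp]
      omega
    · rw [if_neg (show ¬ ((n % 2 : Nat) : Int) ≠ 0 by simp; omega), if_neg hp]
      omega

-- ===== VERDICT (by name: the statement is the Claim_ definition above) =====
theorem Cipher_Zeroes_spec : Claim_equal_Cipher_Zeroes := by
  intro N _
  exact main_eq N
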